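-- pv_equiv track=rewrite | github.com/pypi-data/pypi-mirror-28 | packages/yac/yac-1.4.6.tar.gz/yac-1.4.6/yac/lib/validator.py | find_missing_fields
-- ===== SOURCE A (Python) =====
-- def find_missing_fields(dictionary, required_fields):
--
--     missing_fields = []
--
--     for i,field_path in enumerate(required_fields):
--
--         path_parts = field_path.split(".")
--
--         path_len = len(path_parts)
--
--         if (path_len == 1 and
--             path_parts[0] not in dictionary):
--
--             missing_fields = missing_fields + [required_fields[i]]
--
--         elif ( path_len == 2 and
--                ( (path_parts[0] not in dictionary) or
--                  (path_parts[1] not in dictionary[path_parts[0]])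
--                )
--              ):
--
--             missing_fields = missing_fields + [required_fields[i]]
--
--         elif ( path_len == 3 and
--                ( (path_parts[0] not in dictionary) or
--                  (path_parts[1] not in dictionary[path_parts[0]]) or
--                  (path_parts[2] not in dictionary[path_parts[0]][path_parts[1]] )
--                )
--              ):
--
--             missing_fields = missing_fields + [required_fields[i]]
--
--         elif ( path_len == 4 and
--                ( (path_parts[0] not in dictionary) or
--                  (path_parts[1] not in dictionary[path_parts[0]]) or
--                  (path_parts[2] not in dictionary[path_parts[0]][path_parts[1]]) or
--                  (path_parts[3] not in dictionary[path_parts[0]][path_parts[1]][path_parts[2]])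
--                )
--              ):
--
--             missing_fields = missing_fields + [required_fields[i]]
--
--     return missing_fields
-- ===== SOURCE B (Python) =====
-- def find_missing_fields(dictionary, required_fields):
--     # Generalized walk: one cursor loop over the dotted parts replaces the four
--     # unrolled depth branches; paths deeper than 4 are outside the supported
--     # depth and are skipped, as in the original.
--     missing_fields = []
--     for field_path in required_fields:
--         path_parts = field_path.split(".")
--         if not (1 <= len(path_parts) <= 4):
--             continue
--         cur = dictionary
--         for part in path_parts:
--             if part not in cur:
--                 missing_fields.append(field_path)
--                 break
--             cur = cur[part]
--     return missing_fields
-- ===== Notes on version B (the rewrite author's own statement) =====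
-- stated objective: simpler
-- what changed: Replaces the four unrolled depth-specific branch conditions (which rebuild every prefix lookup per branch and extend the result by list re-concatenation) with a single cursor walk over the dotted parts, one membership test and lookup per level and an append; the documented depth limit of 4 is kept as one guard.
import Mathlib
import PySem

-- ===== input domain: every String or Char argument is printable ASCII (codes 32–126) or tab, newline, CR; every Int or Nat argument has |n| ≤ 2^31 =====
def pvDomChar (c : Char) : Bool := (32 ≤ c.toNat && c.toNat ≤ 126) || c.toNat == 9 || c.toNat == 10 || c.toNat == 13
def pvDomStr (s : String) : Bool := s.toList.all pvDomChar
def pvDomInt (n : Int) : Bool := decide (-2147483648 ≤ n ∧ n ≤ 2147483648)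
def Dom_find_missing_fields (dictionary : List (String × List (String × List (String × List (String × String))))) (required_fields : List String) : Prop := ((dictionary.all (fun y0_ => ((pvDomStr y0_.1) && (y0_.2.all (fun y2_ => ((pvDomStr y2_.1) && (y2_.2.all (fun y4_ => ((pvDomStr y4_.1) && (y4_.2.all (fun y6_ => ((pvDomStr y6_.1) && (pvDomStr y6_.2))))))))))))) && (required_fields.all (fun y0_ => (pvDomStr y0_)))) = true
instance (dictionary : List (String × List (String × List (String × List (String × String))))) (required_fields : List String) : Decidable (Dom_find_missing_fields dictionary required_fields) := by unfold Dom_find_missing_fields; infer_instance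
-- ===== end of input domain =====

-- B replaces A's four unrolled depth branches by one cursor walk over the dotted parts (simpler decomposition, same behaviour).

-- ===== PORT A =====
-- literal transliteration: enumerate + the four depth-specific branch conditions,
-- `p in d` = key membership, `d[p]` = first-binding lookup (only reached when the
-- membership test passed, so the `.getD` default is never the value used)
def find_missing_fields (dictionary : List (String × List (String × List (String × List (String × String))))) (required_fields : List String) : List String :=
  (PySem.List.enumerate required_fields 0).foldl (fun missing_fields ifp =>
    let i := ifp.1
    let field_path := ifp.2
    let path_parts := (PySem.Str.split? field_path ".").getD []  -- sep "." ≠ "", so split? is `some`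
    let path_len := path_parts.length
    let p0 := PySem.List.pyGetD path_parts 0 ""
    let p1 := PySem.List.pyGetD path_parts 1 ""
    let p2 := PySem.List.pyGetD path_parts 2 ""
    let p3 := PySem.List.pyGetD path_parts 3 ""
    let mem0 := dictionary.any (fun kv => kv.1 == p0)
    let d1 := (List.lookup p0 dictionary).getD []
    let mem1 := d1.any (fun kv => kv.1 == p1)
    let d2 := (List.lookup p1 d1).getD []
    let mem2 := d2.any (fun kv => kv.1 == p2)
    let d3 := (List.lookup p2 d2).getD []
    let mem3 := d3.any (fun kv => kv.1 == p3)
    if path_len = 1 ∧ !mem0 then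
      missing_fields ++ [PySem.List.pyGetD required_fields i ""]
    else if path_len = 2 ∧ (!mem0 || !mem1) then
      missing_fields ++ [PySem.List.pyGetD required_fields i ""]
    else if path_len = 3 ∧ (!mem0 || !mem1 || !mem2) then
      missing_fields ++ [PySem.List.pyGetD required_fields i ""]
    else if path_len = 4 ∧ (!mem0 || !mem1 || !mem2 || !mem3) then
      missing_fields ++ [PySem.List.pyGetD required_fields i ""]
    else missing_fields) []

-- ===== PORT B =====
-- the cursor walk, one typed helper per nesting level (the cursor's type changes
-- as the Python loop descends); at level 4 the remaining parts list is the last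
-- part alone, since the 1..4 guard bounds the walk's depth
def pvWalk4 (cur : List (String × String)) : List String → Bool
  | [] => false
  | p :: _ => !(cur.any (fun kv => kv.1 == p))

def pvWalk3 (cur : List (String × List (String × String))) : List String → Bool
  | [] => false
  | p :: rest =>
    if cur.any (fun kv => kv.1 == p) then pvWalk4 ((List.lookup p cur).getD []) rest else true

def pvWalk2 (cur : List (String × List (String × List (String × String)))) : List String → Bool
  | [] => false
  | p :: rest =>
    if cur.any (fun kv => kv.1 == p) then pvWalk3 ((List.lookup p cur).getD []) rest else true

def pvWalk1 (cur : List (String × List (String × List (String × List (String × String))))) : List String → Bool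
  | [] => false
  | p :: rest =>
    if cur.any (fun kv => kv.1 == p) then pvWalk2 ((List.lookup p cur).getD []) rest else true

def find_missing_fields_alt (dictionary : List (String × List (String × List (String × List (String × String))))) (required_fields : List String) : List String :=
  required_fields.foldl (fun missing_fields field_path =>
    let path_parts := (PySem.Str.split? field_path ".").getD []  -- sep "." ≠ "", so split? is `some`
    if 1 ≤ path_parts.length ∧ path_parts.length ≤ 4 then
      if pvWalk1 dictionary path_parts then missing_fields ++ [field_path] else missing_fields
    else missing_fields) []

-- ===== PRECONDITION & SPEC =====
def Spec_find_missing_fields (dictionary : List (String × List (String × List (String × List (String × String))))) (required_fields : List String) (out : List String) : Prop := out = find_missing_fields_alt dictionary required_fields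
instance (dictionary : List (String × List (String × List (String × List (String × String))))) (required_fields : List String) (out : List String) : Decidable (Spec_find_missing_fields dictionary required_fields out) := by unfold Spec_find_missing_fields; infer_instance

-- ===== CLAIM (what is proved, stated in full; the proofs are below) =====
def Claim_equal_find_missing_fields : Prop := ∀ (dictionary : List (String × List (String × List (String × List (String × String))))) (required_fields : List String), Dom_find_missing_fields dictionary required_fields → Spec_find_missing_fields dictionary required_fields (find_missing_fields dictionary required_fields)

-- ===== LEMMAS AND PROOFS =====

-- fold over enumerate, when the step only uses the element, is the plain fold
theorem pv_foldl_enumerate_snd {α β : Type} (g : β → α → β) :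
    ∀ (xs : List α) (s : Int) (init : β),
      (PySem.List.enumerate xs s).foldl (fun acc p => g acc p.2) init = xs.foldl g init := by
  intro xs
  induction xs with
  | nil => intro s init; simp [PySem.List.enumerate_nil]
  | cons x xs ih => intro s init; simp [PySem.List.enumerate_cons, List.foldl, ih]

-- A's per-field branch chain equals B's guarded cursor walk, for any parts list
theorem pv_step_eq (dictionary : List (String × List (String × List (String × List (String × String)))))
    (path_parts : List String) (acc : List String) (fp : String) :
    (let path_len := path_parts.length
     let p0 := PySem.List.pyGetD path_parts 0 ""
     let p1 := PySem.List.pyGetD path_parts 1 ""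
     let p2 := PySem.List.pyGetD path_parts 2 ""
     let p3 := PySem.List.pyGetD path_parts 3 ""
     let mem0 := dictionary.any (fun kv => kv.1 == p0)
     let d1 := (List.lookup p0 dictionary).getD []
     let mem1 := d1.any (fun kv => kv.1 == p1)
     let d2 := (List.lookup p1 d1).getD []
     let mem2 := d2.any (fun kv => kv.1 == p2)
     let d3 := (List.lookup p2 d2).getD []
     let mem3 := d3.any (fun kv => kv.1 == p3)
     if path_len = 1 ∧ !mem0 then acc ++ [fp]
     else if path_len = 2 ∧ (!mem0 || !mem1) then acc ++ [fp]
     else if path_len = 3 ∧ (!mem0 || !mem1 || !mem2) then acc ++ [fp]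
     else if path_len = 4 ∧ (!mem0 || !mem1 || !mem2 || !mem3) then acc ++ [fp]
     else acc)
    = (if 1 ≤ path_parts.length ∧ path_parts.length ≤ 4 then
         if pvWalk1 dictionary path_parts then acc ++ [fp] else acc
       else acc) := by
  match path_parts with
  | [] => simp
  | [a] =>
    simp only [pvWalk1, pvWalk2, PySem.List.pyGetD, PySem.List.pyGet?, PySem.List.pyIdx?, List.length_cons, List.length_nil]
    cases h0 : dictionary.any (fun kv => kv.1 == a) <;> simp [h0]
  | [a, b] =>
    simp only [pvWalk1, pvWalk2, pvWalk3, PySem.List.pyGetD, PySem.List.pyGet?, PySem.List.pyIdx?, List.length_cons, List.length_nil]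
    cases h0 : dictionary.any (fun kv => kv.1 == a) <;>
      cases h1 : ((List.lookup a dictionary).getD []).any (fun kv => kv.1 == b) <;> simp [h0, h1]
  | [a, b, c] =>
    simp only [pvWalk1, pvWalk2, pvWalk3, PySem.List.pyGetD, PySem.List.pyGet?, PySem.List.pyIdx?, List.length_cons, List.length_nil]
    cases h0 : dictionary.any (fun kv => kv.1 == a) <;>
      cases h1 : ((List.lookup a dictionary).getD []).any (fun kv => kv.1 == b) <;>
      cases h2 : ((List.lookup b ((List.lookup a dictionary).getD [])).getD []).any (fun kv => kv.1 == c) <;>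
      simp [pvWalk4, h0, h1, h2]
  | [a, b, c, d] =>
    simp only [pvWalk1, pvWalk2, pvWalk3, PySem.List.pyGetD, PySem.List.pyGet?, PySem.List.pyIdx?, List.length_cons, List.length_nil]
    cases h0 : dictionary.any (fun kv => kv.1 == a) <;>
      cases h1 : ((List.lookup a dictionary).getD []).any (fun kv => kv.1 == b) <;>
      cases h2 : ((List.lookup b ((List.lookup a dictionary).getD [])).getD []).any (fun kv => kv.1 == c) <;>
      cases h3 : ((List.lookup c ((List.lookup b ((List.lookup a dictionary).getD [])).getD [])).getD []).any (fun kv => kv.1 == d) <;>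
      simp [pvWalk4, h0, h1, h2, h3]
  | a :: b :: c :: d :: e :: rest =>
    simp only [List.length_cons]
    have h1 : ¬(rest.length + 1 + 1 + 1 + 1 + 1 = 1) := by omega
    have h2 : ¬(rest.length + 1 + 1 + 1 + 1 + 1 = 2) := by omega
    have h3 : ¬(rest.length + 1 + 1 + 1 + 1 + 1 = 3) := by omega
    have h4' : ¬(rest.length + 1 + 1 + 1 + 1 + 1 = 4) := by omega
    have h4 : ¬(rest.length + 1 + 1 + 1 + 1 + 1 ≤ 4) := by omega
    simp [h2, h3, h4', h4]

-- ===== VERDICT (by name: the statement is the Claim_ definition above) =====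
theorem find_missing_fields_spec : Claim_equal_find_missing_fields := by
  intro dictionary required_fields _
  show find_missing_fields dictionary required_fields = find_missing_fields_alt dictionary required_fields
  unfold find_missing_fields find_missing_fields_alt
  refine Eq.trans (PySem.List.foldl_congr_mem _ _ _ _ ?_)
    (pv_foldl_enumerate_snd (fun acc fp =>
      let path_parts := (PySem.Str.split? fp ".").getD []
      if 1 ≤ path_parts.length ∧ path_parts.length ≤ 4 then
        if pvWalk1 dictionary path_parts then acc ++ [fp] else acc
      else acc) required_fields 0 [])
  intro acc p hp
  rcases (PySem.List.mem_enumerate_iff _ _ _).1 hp with ⟨k, hk, rfl⟩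
  have hget : PySem.List.pyGetD required_fields ((0 : Int) + k) "" = required_fields[k] := by
    simp [PySem.List.pyGetD_natCast, List.getD_eq_getElem?_getD, hk]
  simp only [hget]
  exact pv_step_eq dictionary ((PySem.Str.split? required_fields[k] ".").getD []) acc required_fields[k]
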